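-- pv_equiv track=rewrite | github.com/marcelowsena/InsumoOrcamento | src/core/data_processor.py | agrupar_lancamentos_por_obra
-- ===== SOURCE A (Python) =====
-- from typing import Dict, List, Optional, Tuple, Any
--
-- def agrupar_lancamentos_por_obra(lancamentos: List[Dict]) -> Dict[int, List[Dict]]:
--     grupos = {}
--     for lancamento in lancamentos:
--         obra_id = lancamento['building_id']
--         if obra_id not in grupos:
--             grupos[obra_id] = []
--         grupos[obra_id].append(lancamento)
--     return grupos
-- ===== SOURCE B (Python) =====
-- def agrupar_lancamentos_por_obra(lancamentos):
--     chaves = list(dict.fromkeys(l['building_id'] for l in lancamentos))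
--     return {k: [l for l in lancamentos if l['building_id'] == k] for k in chaves}
-- ===== Notes on version B (the rewrite author's own statement) =====
-- stated objective: alternative
-- what changed: Replaces the single dict-accumulating pass (create-empty-then-append per entry) with a two-phase form: compute the distinct building_ids in first-occurrence order via dict.fromkeys, then build each group with a separate filtering scan per key.
import Mathlib
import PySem

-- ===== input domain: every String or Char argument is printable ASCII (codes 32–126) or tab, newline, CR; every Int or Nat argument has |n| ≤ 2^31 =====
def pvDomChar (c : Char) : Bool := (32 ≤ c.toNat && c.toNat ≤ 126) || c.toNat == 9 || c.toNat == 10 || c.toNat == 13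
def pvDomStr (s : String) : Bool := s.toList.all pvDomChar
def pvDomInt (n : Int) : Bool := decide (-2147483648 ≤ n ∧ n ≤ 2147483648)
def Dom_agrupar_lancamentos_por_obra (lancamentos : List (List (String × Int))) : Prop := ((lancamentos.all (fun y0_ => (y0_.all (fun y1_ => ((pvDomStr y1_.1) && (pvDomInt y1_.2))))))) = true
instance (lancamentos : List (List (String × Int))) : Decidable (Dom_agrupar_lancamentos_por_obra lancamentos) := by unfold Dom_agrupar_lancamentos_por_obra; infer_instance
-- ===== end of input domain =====

-- B groups by two phases (distinct keys in first-occurrence order, then one filtering scan per key)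
-- instead of A's single dict-accumulating pass; same return value, no speed claim.

-- lancamento['building_id']: first-match lookup in the association list (none = KeyError, excluded by Pre_)
def pvId (lancamento : List (String × Int)) : Option Int := lancamento.lookup "building_id"

-- ===== PORT A =====
-- one iteration of A's loop body; on a missing key Python raises KeyError (outside Pre_), the port skips the entry
def pvStepA (grupos : PySem.Dict Int (List (List (String × Int)))) (lancamento : List (String × Int)) :
    PySem.Dict Int (List (List (String × Int))) :=
  match pvId lancamento with
  | none => grupos
  | some obra_id =>
      let grupos := if grupos.contains obra_id then grupos else grupos.insert obra_id []
      grupos.modify obra_id [] (fun xs => xs ++ [lancamento])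

def agrupar_lancamentos_por_obra (lancamentos : List (List (String × Int))) : List (Int × List (List (String × Int))) :=
  (lancamentos.foldl pvStepA PySem.Dict.empty).items

-- ===== PORT B =====
def agrupar_lancamentos_por_obra_alt (lancamentos : List (List (String × Int))) : List (Int × List (List (String × Int))) :=
  -- chaves = list(dict.fromkeys(l['building_id'] for l in lancamentos)); missing key = KeyError (outside Pre_), skipped here
  let chaves := PySem.List.dedup (lancamentos.filterMap pvId)
  -- {k: [l for l in lancamentos if l['building_id'] == k] for k in chaves}; chaves is duplicate-free,
  -- so the dict comprehension's association list is exactly this map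
  chaves.map (fun k => (k, lancamentos.filter (fun l => pvId l == some k)))

-- ===== PRECONDITION & SPEC =====
-- Pre_ excludes exactly the inputs where some entry lacks the 'building_id' key, on which A raises KeyError.
def Pre_agrupar_lancamentos_por_obra (lancamentos : List (List (String × Int))) : Prop :=
  (lancamentos.all (fun l => (pvId l).isSome)) = true
instance (lancamentos : List (List (String × Int))) : Decidable (Pre_agrupar_lancamentos_por_obra lancamentos) := by unfold Pre_agrupar_lancamentos_por_obra; infer_instance
def pvWitness_agrupar_lancamentos_por_obra : (List (List (String × Int))) := [[("building_id", 1), ("valor", 5)], [("building_id", 2)], [("building_id", 1)]]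

def Spec_agrupar_lancamentos_por_obra (lancamentos : List (List (String × Int))) (out : List (Int × List (List (String × Int)))) : Prop := out = agrupar_lancamentos_por_obra_alt lancamentos
instance (lancamentos : List (List (String × Int))) (out : List (Int × List (List (String × Int)))) : Decidable (Spec_agrupar_lancamentos_por_obra lancamentos out) := by unfold Spec_agrupar_lancamentos_por_obra; infer_instance

-- ===== CLAIM (what is proved, stated in full; the proofs are below) =====
def Claim_equal_agrupar_lancamentos_por_obra : Prop := ∀ (lancamentos : List (List (String × Int))), Dom_agrupar_lancamentos_por_obra lancamentos → Pre_agrupar_lancamentos_por_obra lancamentos → Spec_agrupar_lancamentos_por_obra lancamentos (agrupar_lancamentos_por_obra lancamentos)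

-- ===== LEMMAS AND PROOFS =====

-- characterisation of A's fold: keys (in order), their uniqueness, and each group's content
theorem pvFoldA_char (l : List (List (String × Int))) :
    ∀ (d : PySem.Dict Int (List (List (String × Int)))), d.keys.Nodup →
      (l.foldl pvStepA d).keys.Nodup ∧
      (l.foldl pvStepA d).keys = PySem.Set.update d.keys (l.filterMap pvId) ∧
      ∀ c, (l.foldl pvStepA d).getD c [] = d.getD c [] ++ l.filter (fun x => pvId x == some c) := by
  induction l with
  | nil =>
      intro d hnd
      refine ⟨hnd, ?_, ?_⟩ <;> simp [PySem.Set.update]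
  | cons x xs ih =>
      intro d hnd
      simp only [List.foldl_cons]
      cases hid : pvId x with
      | none =>
          have hd : pvStepA d x = d := by simp [pvStepA, hid]
          rw [hd]
          obtain ⟨h1, h2, h3⟩ := ih d hnd
          refine ⟨h1, ?_, ?_⟩
          · rw [h2]; simp [hid]
          · intro c; rw [h3]; simp [hid]
      | some k =>
          have hcontains : d.contains k = true ↔ k ∈ d.keys := PySem.Dict.contains_iff_mem_keys d k
          have hkeysg : (pvStepA d x).keys = PySem.Set.add d.keys k := by
            by_cases hdc : d.contains k = true
            · have hmem : k ∈ d.keys := hcontains.mp hdc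
              simp [pvStepA, hid, hdc, PySem.Dict.keys_modify,
                PySem.Dict.keys_insert_of_contains d _ hdc, PySem.Set.add_of_mem hmem]
            · have hdc' : d.contains k = false := by simpa using hdc
              have hmem : k ∉ d.keys := fun h => hdc (hcontains.mpr h)
              simp [pvStepA, hid, hdc', PySem.Dict.keys_modify,
                PySem.Dict.keys_insert_of_contains _ _ (PySem.Dict.contains_insert_self d k []),
                PySem.Dict.keys_insert_of_not_contains d _ hdc', PySem.Set.add_of_not_mem hmem]
          have hndg : (pvStepA d x).keys.Nodup := by
            rw [hkeysg]
            by_cases hmem : k ∈ d.keys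
            · rwa [PySem.Set.add_of_mem hmem]
            · rw [PySem.Set.add_of_not_mem hmem]
              simp only [List.nodup_append, List.nodup_cons, List.nodup_nil, and_true]
              refine ⟨hnd, by simp, ?_⟩
              intro a ha b hb
              simp only [List.mem_singleton] at hb
              subst hb
              exact fun he => hmem (he ▸ ha)
          have hgetDg : ∀ c, (pvStepA d x).getD c [] =
              if c = k then d.getD k [] ++ [x] else d.getD c [] := by
            intro c
            by_cases hdc : d.contains k = true
            · simp [pvStepA, hid, hdc, PySem.Dict.getD_modify]
            · have hdc' : d.contains k = false := by simpa using hdc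
              have hnone : d.getD k ([] : List (List (String × Int))) = [] :=
                PySem.Dict.getD_of_not_contains d _ hdc'
              simp [pvStepA, hid, hdc', PySem.Dict.getD_modify, PySem.Dict.getD_insert, hnone]
              split_ifs <;> rfl
          obtain ⟨h1, h2, h3⟩ := ih (pvStepA d x) hndg
          refine ⟨h1, ?_, ?_⟩
          · rw [h2, hkeysg]
            simp [hid, PySem.Set.update_cons]
          · intro c
            rw [h3, hgetDg c]
            by_cases hc : c = k
            · subst hc; simp [hid]
            · have : (some k == some c) = false := by simp [Ne.symm hc]
              simp [hid, this, hc]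

theorem agrupar_lancamentos_por_obra_spec : Claim_equal_agrupar_lancamentos_por_obra := by
  intro lancamentos _ _
  unfold Spec_agrupar_lancamentos_por_obra
  obtain ⟨hnd, hkeys, hgetD⟩ := pvFoldA_char lancamentos PySem.Dict.empty (by simp [PySem.Dict.keys_empty])
  unfold agrupar_lancamentos_por_obra agrupar_lancamentos_por_obra_alt
  rw [PySem.Dict.items_eq_map_keys _ hnd ([] : List (List (String × Int)))]
  rw [hkeys]
  simp only [PySem.Dict.keys_empty, PySem.List.dedup_eq_ofList]
  have hupd : PySem.Set.update ([] : List Int) (lancamentos.filterMap pvId)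
      = PySem.Set.ofList (lancamentos.filterMap pvId) := rfl
  rw [hupd]
  apply List.map_congr_left
  intro k _
  have := hgetD k
  simp [PySem.Dict.getD_empty] at this
  simp [this]
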